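-- pv_equiv track=rewrite | github.com/NCMlab/CognitiveTasks | DataHandlingScripts/ReorderResultsForPrinting.py | ReorderDMSResults
-- ===== SOURCE A (Python) =====
-- import collections
--
-- def ReorderDMSResults(Results):
--     # When the results are calculated it is easier to code the scoring based on load
--     # but this is order hard to read at the output.
--     # This code reorders results based on the measure instead of the load
--     # What measures to cycle over
--     MeasureList = ['RT', 'Acc','NResp']
--     # what type of measures to cycle over
--     TypeList = ['Rel', 'Abs']
--     # create an empty ordered dictionary
--     Res = collections.OrderedDict()
--     for Type in TypeList:
--         for Tag in MeasureList:
--             for k in range(1,11):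
--                 for i in Results:
--                     if (i.find(Type) >= 0) and (i.find(Tag) >= 0) and (i.find('Load'+str(k).zfill(2)) >= 0):
--                         Res[i] = Results['DMSBeh1'][i]
--     return Res
-- ===== SOURCE B (Python) =====
-- import collections
--
-- _TYPES = ['Rel', 'Abs']
-- _TAGS = ['RT', 'Acc', 'NResp']
-- _LOADS = ['Load' + str(k).zfill(2) for k in range(1, 11)]
--
--
-- def _rank(i):
--     # first matching (Type, Tag, Load) triple, encoded as one bucket index 0..59
--     t = next((n for n, s in enumerate(_TYPES) if s in i), None)
--     g = next((n for n, s in enumerate(_TAGS) if s in i), None)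
--     l = next((n for n, s in enumerate(_LOADS) if s in i), None)
--     if t is None or g is None or l is None:
--         return None
--     return (t * 3 + g) * 10 + l
--
--
-- def ReorderDMSResults(Results):
--     # classify every key once, bucket by its first matching triple, then assemble
--     buckets = {}
--     for i in Results:
--         r = _rank(i)
--         if r is not None:
--             buckets[r] = buckets.get(r, []) + [i]
--     Res = collections.OrderedDict()
--     for r in range(60):
--         for i in buckets.get(r, []):
--             Res[i] = Results['DMSBeh1'][i]
--     return Res
-- ===== Notes on version B (the rewrite author's own statement) =====
-- stated objective: faster
-- what changed: A rescans all keys 60 times (once per Type x Tag x Load triple, with three substring searches per key per pass); B classifies each key once into its first matching bucket (computing the first contained Type, Tag and Load index in a single pass) and then assembles the buckets in the fixed triple order.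
import Mathlib
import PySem

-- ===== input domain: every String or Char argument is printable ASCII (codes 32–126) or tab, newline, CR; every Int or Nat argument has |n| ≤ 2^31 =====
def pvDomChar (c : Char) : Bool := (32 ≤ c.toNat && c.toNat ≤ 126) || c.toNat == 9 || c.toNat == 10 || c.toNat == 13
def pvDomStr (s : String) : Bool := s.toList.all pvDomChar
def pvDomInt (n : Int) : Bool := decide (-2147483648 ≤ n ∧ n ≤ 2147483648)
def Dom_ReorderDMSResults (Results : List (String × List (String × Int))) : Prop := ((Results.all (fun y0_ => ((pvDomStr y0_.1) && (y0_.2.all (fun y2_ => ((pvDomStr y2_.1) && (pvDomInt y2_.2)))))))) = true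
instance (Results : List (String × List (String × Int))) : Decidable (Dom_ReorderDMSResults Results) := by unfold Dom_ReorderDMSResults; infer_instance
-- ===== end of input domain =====

-- B replaces A's 60 rescans of the keys by one classify-into-buckets pass plus an assembly sweep
-- (same return value; equivalence is about the return value only — neither version mutates its argument).

-- ===== PORT A =====
-- Results['DMSBeh1'][i] — the same lookup expression occurs in both Python sources; Pre_ guarantees
-- the two key lookups succeed (Python raises KeyError otherwise), so getD with a default is exact.
def pvVal (Results : List (String × List (String × Int))) (i : String) : Int :=
  (PySem.Dict.mk ((PySem.Dict.mk Results).getD "DMSBeh1" [])).getD i 0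

-- 'for i in Results' iterates the dict's keys in insertion order; Pre_ excludes duplicate keys
-- (impossible in a Python dict), so 'Results.map Prod.fst' is exact.
def ReorderDMSResults (Results : List (String × List (String × Int))) : List (String × Int) :=
  let Res : PySem.Dict String Int :=
    (["Rel", "Abs"] : List String).foldl (fun Res Typ =>
      (["RT", "Acc", "NResp"] : List String).foldl (fun Res Tag =>
        (PySem.List.pyRange 1 11 1).foldl (fun Res k =>
          (Results.map Prod.fst).foldl (fun Res i =>
            if 0 ≤ PySem.Str.find i Typ ∧ 0 ≤ PySem.Str.find i Tag ∧
                0 ≤ PySem.Str.find i ("Load" ++ PySem.Str.zfill (PySem.Int.toStr k) 2)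
            then Res.insert i (pvVal Results i) else Res) Res) Res) Res) PySem.Dict.empty
  Res.items

-- ===== PORT B =====
def pvLoads : List String :=
  (PySem.List.pyRange 1 11 1).map (fun k => "Load" ++ PySem.Str.zfill (PySem.Int.toStr k) 2)

-- next((n for n, s in enumerate(pats) if s in i), None)
def pvFirstIn : List String → String → Option Nat
  | [], _ => none
  | p :: ps, i => if PySem.Str.isIn p i then some 0 else (pvFirstIn ps i).map (· + 1)

-- _rank(i): the first matching (Type, Tag, Load) triple encoded as a bucket index 0..59
def pvRank (i : String) : Option Nat :=
  match pvFirstIn ["Rel", "Abs"] i, pvFirstIn ["RT", "Acc", "NResp"] i, pvFirstIn pvLoads i with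
  | some t, some g, some l => some ((t * 3 + g) * 10 + l)
  | _, _, _ => none

-- range(60) runs over the nonnegative ints 0..59 used only as dict keys, ported as List.range 60.
def ReorderDMSResults_alt (Results : List (String × List (String × Int))) : List (String × Int) :=
  let buckets : PySem.Dict Nat (List String) :=
    (Results.map Prod.fst).foldl (fun d i =>
      match pvRank i with
      | some r => d.modify r [] (· ++ [i])
      | none => d) PySem.Dict.empty
  (((List.range 60).foldl (fun Res r =>
      (buckets.getD r []).foldl (fun Res i => Res.insert i (pvVal Results i)) Res)
    (PySem.Dict.empty : PySem.Dict String Int)).items)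

-- ===== PRECONDITION & SPEC =====
-- a key the nested loops pick up (contains a Type, a Tag and a Load marker)
def pvRelevant (i : String) : Bool :=
  ((["Rel", "Abs"] : List String).any fun p => PySem.Str.isIn p i) &&
  ((["RT", "Acc", "NResp"] : List String).any fun p => PySem.Str.isIn p i) &&
  (pvLoads.any fun p => PySem.Str.isIn p i)

-- Pre_ excludes (a) association lists with duplicate keys — outer or inside the 'DMSBeh1' entry —
-- which cannot arise from a Python dict, and (b) inputs where some matched key is missing from
-- Results['DMSBeh1'], on which A raises KeyError.
def Pre_ReorderDMSResults (Results : List (String × List (String × Int))) : Prop :=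
  (Results.map Prod.fst).Nodup ∧
  (((PySem.Dict.mk Results).getD "DMSBeh1" []).map Prod.fst).Nodup ∧
  ∀ p ∈ Results, pvRelevant p.1 →
    (PySem.Dict.mk ((PySem.Dict.mk Results).getD "DMSBeh1" [])).contains p.1 = true

instance (Results : List (String × List (String × Int))) : Decidable (Pre_ReorderDMSResults Results) := by
  unfold Pre_ReorderDMSResults; infer_instance

def pvWitness_ReorderDMSResults : (List (String × List (String × Int))) :=
  [("RelRTLoad01", []), ("AbsAccLoad02", []), ("DMSBeh1", [("RelRTLoad01", 7), ("AbsAccLoad02", 3)])]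

def Spec_ReorderDMSResults (Results : List (String × List (String × Int))) (out : List (String × Int)) : Prop := out = ReorderDMSResults_alt Results
instance (Results : List (String × List (String × Int))) (out : List (String × Int)) : Decidable (Spec_ReorderDMSResults Results out) := by unfold Spec_ReorderDMSResults; infer_instance

-- ===== CLAIM (what is proved, stated in full; the proofs are below) =====
def Claim_equal_ReorderDMSResults : Prop := ∀ (Results : List (String × List (String × Int))), Dom_ReorderDMSResults Results → Pre_ReorderDMSResults Results → Spec_ReorderDMSResults Results (ReorderDMSResults Results)

-- ===== LEMMAS AND PROOFS =====

-- the condition of A's innermost loop, indexed by the bucket number r = (Type*3 + Tag)*10 + Load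
abbrev pvMatchN (i : String) (r : Nat) : Prop :=
  0 ≤ PySem.Str.find i ((["Rel", "Abs"] : List String).getD (r / 30) "") ∧
  0 ≤ PySem.Str.find i ((["RT", "Acc", "NResp"] : List String).getD (r / 10 % 3) "") ∧
  0 ≤ PySem.Str.find i (pvLoads.getD (r % 10) "")

-- the first bucket whose triple matches i
def pvFM (i : String) : Option Nat := (List.range 60).find? (fun r => decide (pvMatchN i r))

-- A's four nested loops are the 60 bucket passes in bucket order (pure reindexing, definitional)
theorem ReorderDMSResults_eq_rangeFold (Results : List (String × List (String × Int))) :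
    ReorderDMSResults Results =
      ((List.range 60).foldl (fun d r =>
        (Results.map Prod.fst).foldl (fun Res i =>
          if pvMatchN i r then Res.insert i (pvVal Results i) else Res) d)
        (PySem.Dict.empty : PySem.Dict String Int)).items := by
  rfl

theorem pv_find_nonneg_iff (i p : String) : 0 ≤ PySem.Str.find i p ↔ PySem.Str.isIn p i = true := by
  rw [PySem.Str.find_nonneg_iff, PySem.Str.isIn_iff_infix]

-- re-inserting a key already bound to the same value is a no-op
theorem pv_insert_mem (w : String → Int) (S : List String) (i : String) (hi : i ∈ S) :
    (PySem.Dict.mk (S.map (fun j => (j, w j)))).insert i (w i) =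
      PySem.Dict.mk (S.map (fun j => (j, w j))) := by
  have hc : (PySem.Dict.mk (S.map (fun j => (j, w j)))).contains i = true := by
    rw [PySem.Dict.contains_eq_decide_mem_keys]
    simp [PySem.Dict.keys, hi]
  apply PySem.Dict.ext
  rw [PySem.Dict.items_insert_of_contains _ _ hc]
  show (S.map (fun j => (j, w j))).map _ = S.map (fun j => (j, w j))
  rw [List.map_map]
  apply List.map_congr_left
  intro j _
  by_cases h : j = i
  · subst h; simp
  · simp [h]

-- a guarded insert loop over distinct keys appends exactly the new matching keys
theorem pv_foldl_ins (C : String → Prop) [DecidablePred C] (w : String → Int) :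
    ∀ (ks S : List String), ks.Nodup →
      ks.foldl (fun Res i => if C i then Res.insert i (w i) else Res)
          (PySem.Dict.mk (S.map (fun j => (j, w j)))) =
        PySem.Dict.mk ((S ++ ks.filter (fun i => decide (C i ∧ i ∉ S))).map (fun j => (j, w j))) := by
  intro ks
  induction ks with
  | nil => intro S _; simp
  | cons i ks ih =>
    intro S hnd
    rw [List.nodup_cons] at hnd
    obtain ⟨hik, hks⟩ := hnd
    by_cases hC : C i
    · by_cases hS : i ∈ S
      · have : (i :: ks).foldl (fun Res i => if C i then Res.insert i (w i) else Res)
            (PySem.Dict.mk (S.map (fun j => (j, w j)))) =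
            ks.foldl (fun Res i => if C i then Res.insert i (w i) else Res)
            (PySem.Dict.mk (S.map (fun j => (j, w j)))) := by
          rw [List.foldl_cons, if_pos hC, pv_insert_mem w S i hS]
        rw [this, ih S hks]
        simp [hS]
      · have hfresh : (PySem.Dict.mk (S.map (fun j => (j, w j)))).contains i = false := by
          rw [PySem.Dict.contains_eq_decide_mem_keys]
          simp [PySem.Dict.keys, hS]
        have hins : (PySem.Dict.mk (S.map (fun j => (j, w j)))).insert i (w i) =
            PySem.Dict.mk ((S ++ [i]).map (fun j => (j, w j))) := by
          apply PySem.Dict.ext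
          rw [PySem.Dict.items_insert_of_not_contains _ _ hfresh]
          simp
        rw [List.foldl_cons, if_pos hC, hins, ih (S ++ [i]) hks]
        have hfe : ks.filter (fun j => decide (C j ∧ j ∉ S ++ [i])) =
            ks.filter (fun j => decide (C j ∧ j ∉ S)) := by
          apply List.filter_congr
          intro j hj
          have hji : j ≠ i := fun h => hik (h ▸ hj)
          simp [List.mem_append, hji]
        rw [hfe]
        simp [hC, hS]
    · rw [List.foldl_cons, if_neg hC, ih S hks]
      simp [hC]

-- find? over an initial segment of ℕ finds the least index satisfying p
theorem pv_find?_range (p : Nat → Bool) :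
    ∀ (n r : Nat), ((List.range n).find? p = some r ↔ r < n ∧ p r = true ∧ ∀ r' < r, p r' = false) := by
  intro n
  induction n with
  | zero => intro r; simp
  | succ n ih =>
    intro r
    rw [List.range_succ, List.find?_append]
    constructor
    · intro h
      rcases ho : (List.range n).find? p with _ | r₁
      · rw [ho] at h
        simp at h
        obtain ⟨hp, hr⟩ := h
        have hnone := List.find?_eq_none.mp ho
        refine ⟨by omega, by rwa [hr] at hp, ?_⟩
        intro r' hr'
        simpa using hnone r' (List.mem_range.mpr (by omega))
      · rw [ho] at h
        simp at h
        subst h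
        have := (ih r₁).mp ho
        exact ⟨by omega, this.2.1, this.2.2⟩
    · rintro ⟨hrn, hpr, hmin⟩
      rcases ho : (List.range n).find? p with _ | r₁
      · have hnone := List.find?_eq_none.mp ho
        have hrn' : r = n := by
          by_contra hne
          exact absurd hpr (by simp [hnone r (List.mem_range.mpr (by omega))])
        subst hrn'
        simp [hpr]
      · have h₁ := (ih r₁).mp ho
        have : r₁ = r := by
          rcases Nat.lt_trichotomy r₁ r with h | h | h
          · exact absurd h₁.2.1 (by simp [hmin r₁ h])
          · exact h
          · exact absurd hpr (by simp [h₁.2.2 r h])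
        subst this
        simp

theorem pvFM_eq_some_iff (i : String) (r : Nat) :
    pvFM i = some r ↔ r < 60 ∧ pvMatchN i r ∧ ∀ r' < r, ¬ pvMatchN i r' := by
  unfold pvFM
  rw [pv_find?_range]
  simp only [decide_eq_true_eq, decide_eq_false_iff_not]

-- pvFirstIn finds the least index whose pattern occurs in i
theorem pvFirstIn_spec_some :
    ∀ (ps : List String) (i : String) (t : Nat), pvFirstIn ps i = some t →
      t < ps.length ∧ PySem.Str.isIn (ps.getD t "") i = true ∧
        ∀ t' < t, PySem.Str.isIn (ps.getD t' "") i = false := by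
  intro ps
  induction ps with
  | nil => intro i t h; simp [pvFirstIn] at h
  | cons p ps ih =>
    intro i t h
    by_cases hp : PySem.Str.isIn p i
    · rw [pvFirstIn, if_pos hp] at h
      obtain rfl : t = 0 := by simpa using h.symm
      exact ⟨by simp, by simpa using hp, by omega⟩
    · rw [pvFirstIn, if_neg hp] at h
      rcases ho : pvFirstIn ps i with _ | u
      · rw [ho] at h; simp at h
      · rw [ho] at h
        simp at h
        subst h
        obtain ⟨h1, h2, h3⟩ := ih i u ho
        refine ⟨by simpa using h1, by simpa using h2, ?_⟩
        intro t' ht'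
        cases t' with
        | zero => simpa using hp
        | succ u' => simpa using h3 u' (by omega)

theorem pvFirstIn_spec_none :
    ∀ (ps : List String) (i : String), pvFirstIn ps i = none →
      ∀ t < ps.length, PySem.Str.isIn (ps.getD t "") i = false := by
  intro ps
  induction ps with
  | nil => intro i _ t ht; simp at ht
  | cons p ps ih =>
    intro i h t ht
    by_cases hp : PySem.Str.isIn p i
    · rw [pvFirstIn, if_pos hp] at h; simp at h
    · rw [pvFirstIn, if_neg hp] at h
      rcases ho : pvFirstIn ps i with _ | u
      · cases t with
        | zero => simpa using hp
        | succ u' => simpa using ih i ho u' (by simpa using ht)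
      · rw [ho] at h; simp at h

theorem pvLoads_length : pvLoads.length = 10 := by decide

-- B's single classification pass computes exactly the first matching bucket of A's scan order
theorem pvRank_eq_pvFM (i : String) : pvRank i = pvFM i := by
  have hM : ∀ r : Nat, pvMatchN i r ↔
      (PySem.Str.isIn ((["Rel", "Abs"] : List String).getD (r / 30) "") i = true ∧
       PySem.Str.isIn ((["RT", "Acc", "NResp"] : List String).getD (r / 10 % 3) "") i = true ∧
       PySem.Str.isIn (pvLoads.getD (r % 10) "") i = true) := by
    intro r
    unfold pvMatchN
    rw [pv_find_nonneg_iff, pv_find_nonneg_iff, pv_find_nonneg_iff]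
  unfold pvRank
  rcases ht : pvFirstIn ["Rel", "Abs"] i with _ | t
  · have hn := pvFirstIn_spec_none _ i ht
    symm
    apply List.find?_eq_none.mpr
    intro r hr
    rw [List.mem_range] at hr
    simp only [decide_eq_true_eq]
    intro hm
    have := ((hM r).mp hm).1
    have h30 : r / 30 < 2 := by omega
    rw [hn (r / 30) (by simpa using h30)] at this
    exact absurd this (by simp)
  · rcases hg : pvFirstIn ["RT", "Acc", "NResp"] i with _ | g
    · have hn := pvFirstIn_spec_none _ i hg
      symm
      apply List.find?_eq_none.mpr
      intro r hr
      rw [List.mem_range] at hr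
      simp only [decide_eq_true_eq]
      intro hm
      have := ((hM r).mp hm).2.1
      have h3 : r / 10 % 3 < 3 := by omega
      rw [hn (r / 10 % 3) (by simpa using h3)] at this
      exact absurd this (by simp)
    · rcases hl : pvFirstIn pvLoads i with _ | l
      · have hn := pvFirstIn_spec_none _ i hl
        symm
        apply List.find?_eq_none.mpr
        intro r hr
        rw [List.mem_range] at hr
        simp only [decide_eq_true_eq]
        intro hm
        have := ((hM r).mp hm).2.2
        have h10 : r % 10 < 10 := by omega
        rw [hn (r % 10) (by rw [pvLoads_length]; omega)] at this
        exact absurd this (by simp)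
      · obtain ⟨ht1, ht2, ht3⟩ := pvFirstIn_spec_some _ i t ht
        obtain ⟨hg1, hg2, hg3⟩ := pvFirstIn_spec_some _ i g hg
        obtain ⟨hl1, hl2, hl3⟩ := pvFirstIn_spec_some _ i l hl
        rw [pvLoads_length] at hl1
        simp only [List.length_cons, List.length_nil] at ht1 hg1
        symm
        rw [pvFM_eq_some_iff]
        refine ⟨by omega, ?_, ?_⟩
        · rw [hM]
          have e1 : ((t * 3 + g) * 10 + l) / 30 = t := by omega
          have e2 : ((t * 3 + g) * 10 + l) / 10 % 3 = g := by omega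
          have e3 : ((t * 3 + g) * 10 + l) % 10 = l := by omega
          rw [e1, e2, e3]
          exact ⟨ht2, hg2, hl2⟩
        · intro r' hr'
          rw [hM]
          rintro ⟨c1, c2, c3⟩
          have hd : r' / 30 < t ∨ (r' / 30 = t ∧ r' / 10 % 3 < g) ∨
              (r' / 30 = t ∧ r' / 10 % 3 = g ∧ r' % 10 < l) := by omega
          rcases hd with h | ⟨e1, h⟩ | ⟨e1, e2, h⟩
          · rw [ht3 (r' / 30) h] at c1; exact absurd c1 (by simp)
          · rw [e1] at c1
            rw [hg3 (r' / 10 % 3) h] at c2; exact absurd c2 (by simp)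
          · rw [hl3 (r' % 10) h] at c3; exact absurd c3 (by simp)

-- the buckets dict groups the keys by their rank, preserving arrival order
theorem pv_bucket_getD :
    ∀ (ks : List String) (d : PySem.Dict Nat (List String)) (r : Nat),
      (ks.foldl (fun d i =>
          match pvRank i with
          | some r' => d.modify r' [] (· ++ [i])
          | none => d) d).getD r [] =
        d.getD r [] ++ ks.filter (fun i => pvRank i == some r) := by
  intro ks
  induction ks with
  | nil => intro d r; simp
  | cons i ks ih =>
    intro d r
    rw [List.foldl_cons]
    rcases h : pvRank i with _ | r'
    · have : (pvRank i == some r) = false := by simp [h]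
      rw [ih, List.filter_cons, this]
      simp
    · rw [ih]
      by_cases hrr : r = r'
      · subst hrr
        have : (pvRank i == some r) = true := by simp [h]
        rw [PySem.Dict.getD_modify, if_pos rfl, List.filter_cons, this]
        simp
      · have : (pvRank i == some r) = false := by simp [h, Ne.symm hrr]
        rw [PySem.Dict.getD_modify, if_neg hrr, List.filter_cons, this]
        simp

-- assembling pairwise-disjoint, individually fresh key groups appends them
theorem pv_assemble (w : String → Int) (keys : List String) (hk : keys.Nodup) :
    ∀ (m : Nat),
      ((List.range m).foldl (fun Res r =>
          ((keys.filter (fun i => pvRank i == some r)).foldl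
            (fun Res i => Res.insert i (w i)) Res))
        (PySem.Dict.empty : PySem.Dict String Int)) =
      PySem.Dict.mk (((List.range m).flatMap
        (fun r => keys.filter (fun i => pvRank i == some r))).map (fun j => (j, w j))) := by
  intro m
  induction m with
  | zero => simp; rfl
  | succ m ih =>
    rw [List.range_succ, List.foldl_append, List.foldl_cons, List.foldl_nil, ih]
    set S := (List.range m).flatMap (fun r => keys.filter (fun i => pvRank i == some r)) with hS
    have hmemS : ∀ j ∈ S, ∃ r < m, pvRank j = some r := by
      intro j hj
      rw [hS, List.mem_flatMap] at hj
      obtain ⟨r, hr, hjf⟩ := hj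
      rw [List.mem_range] at hr
      rw [List.mem_filter] at hjf
      exact ⟨r, hr, by simpa using hjf.2⟩
    have hfresh : ∀ a ∈ keys.filter (fun i => pvRank i == some m),
        (PySem.Dict.mk (S.map (fun j => (j, w j)))).contains a = false := by
      intro a ha
      rw [List.mem_filter] at ha
      have ham : pvRank a = some m := by simpa using ha.2
      rw [PySem.Dict.contains_eq_decide_mem_keys]
      simp only [PySem.Dict.keys, List.map_map]
      have : a ∉ S := by
        intro haS
        obtain ⟨r, hrm, hra⟩ := hmemS a haS
        rw [ham] at hra
        simp at hra
        omega
      simp [this]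
    have hnd : ((keys.filter (fun i => pvRank i == some m)).map (fun a => a)).Nodup := by
      simpa using hk.filter _
    apply PySem.Dict.ext
    rw [PySem.Dict.items_foldl_insert_fresh (k := fun a => a) (v := fun a => w a) _ _ hfresh hnd]
    simp [List.flatMap_append, ← hS]

-- A's 60 passes build the same grouped list, keyed by the first matching bucket
theorem pv_Afold (w : String → Int) (keys : List String) (hk : keys.Nodup) :
    ∀ (m : Nat), m ≤ 60 →
      ((List.range m).foldl (fun d r =>
          keys.foldl (fun Res i => if pvMatchN i r then Res.insert i (w i) else Res) d)
        (PySem.Dict.empty : PySem.Dict String Int)) =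
      PySem.Dict.mk (((List.range m).flatMap
        (fun r => keys.filter (fun i => pvFM i == some r))).map (fun j => (j, w j))) := by
  intro m
  induction m with
  | zero => intro _; simp; rfl
  | succ m ih =>
    intro hm
    rw [List.range_succ, List.foldl_append, List.foldl_cons, List.foldl_nil, ih (by omega)]
    set S := (List.range m).flatMap (fun r => keys.filter (fun i => pvFM i == some r)) with hS
    rw [pv_foldl_ins (fun i => pvMatchN i m) w keys S hk]
    have hmemS : ∀ j, (j ∈ S ↔ ∃ r < m, pvFM j = some r ∧ j ∈ keys) := by
      intro j
      rw [hS, List.mem_flatMap]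
      constructor
      · rintro ⟨r, hr, hjf⟩
        rw [List.mem_range] at hr
        rw [List.mem_filter] at hjf
        exact ⟨r, hr, by simpa using hjf.2, hjf.1⟩
      · rintro ⟨r, hr, hfm, hjk⟩
        exact ⟨r, List.mem_range.mpr hr, List.mem_filter.mpr ⟨hjk, by simpa using hfm⟩⟩
    have hfe : keys.filter (fun i => decide (pvMatchN i m ∧ i ∉ S)) =
        keys.filter (fun i => pvFM i == some m) := by
      apply List.filter_congr
      intro j hj
      have hiff : (pvMatchN j m ∧ j ∉ S) ↔ pvFM j = some m := by
        constructor
        · rintro ⟨hmj, hjS⟩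
          rcases ho : pvFM j with _ | r₁
          · exfalso
            unfold pvFM at ho
            have := List.find?_eq_none.mp ho m (List.mem_range.mpr (by omega))
            exact this (by simpa using hmj)
          · obtain ⟨h60, hmr, hmin⟩ := (pvFM_eq_some_iff j r₁).mp ho
            rcases Nat.lt_trichotomy r₁ m with h | h | h
            · exact absurd (hmemS j |>.mpr ⟨r₁, h, ho, hj⟩) hjS
            · rw [h]
            · exact absurd hmj (hmin m h)
        · intro ho
          obtain ⟨h60, hmr, hmin⟩ := (pvFM_eq_some_iff j m).mp ho
          refine ⟨hmr, ?_⟩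
          intro hjS
          obtain ⟨r, hr, hor, _⟩ := (hmemS j).mp hjS
          rw [ho] at hor
          simp at hor
          omega
      have : (pvFM j == some m) = decide (pvFM j = some m) := by
        cases pvFM j with
        | none => simp
        | some v => apply Bool.eq_iff_iff.mpr; simp
      rw [this]
      simp [hiff]
    rw [hfe]
    simp [List.flatMap_append, ← hS]

-- normal form of A
theorem pv_A_eq (Results : List (String × List (String × Int)))
    (h1 : (Results.map Prod.fst).Nodup) :
    ReorderDMSResults Results =
      ((List.range 60).flatMap
        (fun r => (Results.map Prod.fst).filter (fun i => pvFM i == some r))).map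
        (fun j => (j, pvVal Results j)) := by
  rw [ReorderDMSResults_eq_rangeFold,
    pv_Afold (pvVal Results) (Results.map Prod.fst) h1 60 (by omega)]

-- normal form of B
theorem pv_alt_eq (Results : List (String × List (String × Int)))
    (h1 : (Results.map Prod.fst).Nodup) :
    ReorderDMSResults_alt Results =
      ((List.range 60).flatMap
        (fun r => (Results.map Prod.fst).filter (fun i => pvRank i == some r))).map
        (fun j => (j, pvVal Results j)) := by
  unfold ReorderDMSResults_alt
  simp only []
  have hb : ∀ r : Nat,
      ((Results.map Prod.fst).foldl (fun d i =>
          match pvRank i with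
          | some r' => d.modify r' [] (· ++ [i])
          | none => d) PySem.Dict.empty).getD r [] =
        (Results.map Prod.fst).filter (fun i => pvRank i == some r) := by
    intro r
    rw [pv_bucket_getD]
    simp
  simp only [hb]
  rw [pv_assemble (pvVal Results) (Results.map Prod.fst) h1 60]

-- ===== VERDICT (by name: the statement is the Claim_ definition above) =====
theorem ReorderDMSResults_spec : Claim_equal_ReorderDMSResults := by
  intro Results _ hPre
  obtain ⟨h1, _, _⟩ := hPre
  unfold Spec_ReorderDMSResults
  rw [pv_A_eq Results h1, pv_alt_eq Results h1]
  simp only [pvRank_eq_pvFM]
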